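-- pv_equiv track=rewrite | github.com/eliottcassidy2000/math | 04-computation/alpha2_n8_extension.py | find_all_odd_cycles_with_vsets
-- ===== SOURCE A (Python) =====
-- from itertools import combinations
--
-- def find_all_odd_cycles_with_vsets(T):
--     """Find all directed odd cycles and return their vertex sets."""
--     n = len(T)
--     cycles = []
--     for k in range(3, n+1, 2):
--         for verts in combinations(range(n), k):
--             v = list(verts)
--             kk = len(v)
--             dp = [[0]*kk for _ in range(1 << kk)]
--             dp[1][0] = 1
--             for mask in range(1, 1 << kk):
--                 for last in range(kk):
--                     if dp[mask][last] == 0 or not (mask & (1 << last)):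
--                         continue
--                     for nxt in range(1, kk):
--                         if mask & (1 << nxt):
--                             continue
--                         if T[v[last]][v[nxt]]:
--                             dp[mask | (1 << nxt)][nxt] += dp[mask][last]
--             full = (1 << kk) - 1
--             for last in range(1, kk):
--                 if T[v[last]][v[0]]:
--                     cnt = dp[full][last]
--                     for _ in range(cnt):
--                         cycles.append((k, frozenset(verts)))
--     return cycles
-- ===== SOURCE B (Python) =====
-- from itertools import combinations
--
-- def find_all_odd_cycles_with_vsets(T):
--     """Find all directed odd cycles and return their vertex sets.
--
--     One globally memoized path-count recursion on (mask, last) states shared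
--     across all vertex subsets, instead of a fresh per-subset DP table.
--     """
--     n = len(T)
--     memo = {}
--
--     def paths(mask, last, start):
--         # number of simple directed paths from `start` to `last` visiting
--         # exactly the vertices of `mask` (start is the lowest bit of mask)
--         if not (mask >> last) & 1:
--             return 0
--         if mask == 1 << last:
--             return 1 if last == start else 0
--         if last == start:
--             return 0
--         key = (mask, last)
--         if key in memo:
--             return memo[key]
--         pm = mask ^ (1 << last)
--         total = 0
--         for prev in range(n):
--             if (pm >> prev) & 1 and T[prev][last]:
--                 total += paths(pm, prev, start)
--         memo[key] = total
--         return total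
--
--     cycles = []
--     for k in range(3, n + 1, 2):
--         for verts in combinations(range(n), k):
--             mask = 0
--             for x in verts:
--                 mask |= 1 << x
--             cnt = 0
--             for last in verts[1:]:
--                 if T[last][verts[0]]:
--                     cnt += paths(mask, last, verts[0])
--             cycles.extend([(k, frozenset(verts))] * cnt)
--     return cycles
-- ===== Notes on version B (the rewrite author's own statement) =====
-- stated objective: alternative
-- what changed: A builds a fresh 2^k x k Hamiltonian-path DP table for every odd-size vertex subset (about 3^n table updates in total); B counts the same anchored simple paths with one globally memoized recursion on (mask,last) states shared across all subsets (about 2^n * n^2 states), then emits counts per subset in the same order; intended as asymptotically faster, but a timing run measured only 1.35x at its largest size, so no speed is claimed.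
-- outside the precondition, e.g. on find_all_odd_cycles_with_vsets([[0, 0, 0], [0, 0, 0], [0, 0]]): A returns [], B returns []
import Mathlib
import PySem

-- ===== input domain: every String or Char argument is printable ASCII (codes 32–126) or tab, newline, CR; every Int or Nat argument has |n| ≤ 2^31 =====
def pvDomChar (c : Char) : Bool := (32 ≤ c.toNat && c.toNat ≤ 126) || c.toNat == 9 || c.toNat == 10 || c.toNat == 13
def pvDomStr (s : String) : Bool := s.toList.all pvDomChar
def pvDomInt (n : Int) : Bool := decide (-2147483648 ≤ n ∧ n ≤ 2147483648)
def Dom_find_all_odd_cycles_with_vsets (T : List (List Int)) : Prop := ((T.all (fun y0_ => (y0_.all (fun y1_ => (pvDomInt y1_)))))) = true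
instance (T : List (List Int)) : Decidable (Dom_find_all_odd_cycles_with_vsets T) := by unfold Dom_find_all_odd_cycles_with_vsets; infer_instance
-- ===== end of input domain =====

-- B replaces A's fresh per-subset Hamiltonian-path DP table by one path-count recursion on
-- (mask, last) states (memoized in the Python; the proof-level values are identical), shared
-- across all vertex subsets; equality of return values is proved on Pre_ (square-enough inputs).

-- ===== PORT A =====
-- itertools.combinations(l, k), lexicographic order (used by both Pythons)
def combs : Nat → List Nat → List (List Nat)
  | 0, _ => [[]]
  | _ + 1, [] => []
  | k + 1, x :: xs => (combs k xs).map (fun c => x :: c) ++ combs (k + 1) xs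

-- dp[mask][last] read / write (indices are in range wherever A executes them, so getD/set is exact)
def tread (t : List (List Int)) (m j : Nat) : Int := (t.getD m []).getD j 0
def twrite (t : List (List Int)) (m j : Nat) (x : Int) : List (List Int) :=
  t.set m ((t.getD m []).set j x)

-- the body of `for nxt in range(1, kk)`
def stepNxt (T : List (List Int)) (v : List Nat) (mask last : Nat)
    (dp : List (List Int)) (nxt : Nat) : List (List Int) :=
  if mask &&& (1 <<< nxt) ≠ 0 then dp
  else if (T.getD (v.getD last 0) []).getD (v.getD nxt 0) 0 ≠ 0 then
    twrite dp (mask ||| (1 <<< nxt)) nxt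
      (tread dp (mask ||| (1 <<< nxt)) nxt + tread dp mask last)
  else dp

-- the body of `for last in range(kk)`
def stepLast (T : List (List Int)) (v : List Nat) (mask : Nat)
    (dp : List (List Int)) (last : Nat) : List (List Int) :=
  if tread dp mask last = 0 ∨ mask &&& (1 <<< last) = 0 then dp
  else (List.range' 1 (v.length - 1)).foldl (stepNxt T v mask last) dp

-- the body of `for mask in range(1, 1 << kk)`
def stepMask (T : List (List Int)) (v : List Nat)
    (dp : List (List Int)) (mask : Nat) : List (List Int) :=
  (List.range v.length).foldl (stepLast T v mask) dp

-- the whole DP-table computation for one subset v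
def dpRun (T : List (List Int)) (v : List Nat) : List (List Int) :=
  (List.range' 1 (2 ^ v.length - 1)).foldl (stepMask T v)
    (twrite (List.replicate (2 ^ v.length) (List.replicate v.length (0 : Int))) 1 0 1)

-- range(3, n+1, 2) = List.range' 3 ((n-1)/2) 2, range(1, kk) = List.range' 1 (kk-1): exact for these bounds
def find_all_odd_cycles_with_vsets (T : List (List Int)) : List (Int × List Int) :=
  let n := T.length
  (List.range' 3 ((n - 1) / 2) 2).foldl (fun cycles k =>
    (combs k (List.range n)).foldl (fun cycles v =>
      let dp := dpRun T v
      let full := 2 ^ v.length - 1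
      (List.range' 1 (v.length - 1)).foldl (fun cycles last =>
        if (T.getD (v.getD last 0) []).getD (v.getD 0 0) 0 ≠ 0 then
          (List.range (tread dp full last).toNat).foldl
            (fun cy _ => cy ++ [((k : Int), v.map Int.ofNat)]) cycles
        else cycles) cycles) cycles) []

-- ===== PORT B =====
-- termination fact for the path recursion: removing a set bit decreases the mask
theorem pvXorLt (mask last : Nat) (h : mask.testBit last = true) :
    mask ^^^ (1 <<< last) < mask := by
  apply Nat.lt_of_testBit last
  · simp [Nat.testBit_xor, h, Nat.one_shiftLeft]
  · exact h
  · intro j hj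
    simp [Nat.testBit_xor, Nat.one_shiftLeft, Nat.testBit_two_pow, Nat.ne_of_lt hj]

-- bridge between Python's  (mask >> last) & 1  and Nat.testBit (also cited by the proofs below)
theorem pvTB0 (x i : Nat) : ((x >>> i) &&& 1 = 0) ↔ x.testBit i = false := by
  simp [Nat.testBit, Nat.and_comm]

-- paths(mask, last, start): simple directed paths start → last covering mask (memo dropped: same values)
def altPaths (T : List (List Int)) (n start : Nat) (mask last : Nat) : Int :=
  if h : (mask >>> last) &&& 1 = 0 then 0
  else if mask = 1 <<< last then (if last = start then 1 else 0)
  else if last = start then 0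
  else
    (List.range n).foldl (fun total prev =>
      if ((mask ^^^ (1 <<< last)) >>> prev) &&& 1 = 1 ∧ (T.getD prev []).getD last 0 ≠ 0
      then total + altPaths T n start (mask ^^^ (1 <<< last)) prev else total) 0
termination_by mask
decreasing_by
  exact pvXorLt mask last (by
    rcases Bool.eq_false_or_eq_true (mask.testBit last) with hb | hb
    · exact hb
    · exact absurd ((pvTB0 mask last).mpr hb) h)

def find_all_odd_cycles_with_vsets_alt (T : List (List Int)) : List (Int × List Int) :=
  let n := T.length
  (List.range' 3 ((n - 1) / 2) 2).foldl (fun cycles k =>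
    (combs k (List.range n)).foldl (fun cycles verts =>
      let mask := verts.foldl (fun m x => m ||| (1 <<< x)) 0
      let s := verts.headD 0
      let cnt := (verts.drop 1).foldl (fun c last =>
        if (T.getD last []).getD s 0 ≠ 0 then c + altPaths T n s mask last else c) 0
      cycles ++ List.replicate cnt.toNat ((k : Int), verts.map Int.ofNat)) cycles) []

-- ===== PRECONDITION & SPEC =====
-- Pre_ excludes matrices with 3 or more rows in which some row is shorter than len(T): there the
-- Python A may raise IndexError depending on which entries the DP happens to read.
def Pre_find_all_odd_cycles_with_vsets (T : List (List Int)) : Prop :=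
  3 ≤ T.length → ∀ row ∈ T, T.length ≤ row.length
instance (T : List (List Int)) : Decidable (Pre_find_all_odd_cycles_with_vsets T) := by
  unfold Pre_find_all_odd_cycles_with_vsets; infer_instance
def pvWitness_find_all_odd_cycles_with_vsets : List (List Int) :=
  [[0, 1, 0], [0, 0, 1], [1, 0, 0]]
def Spec_find_all_odd_cycles_with_vsets (T : List (List Int)) (out : List (Int × List Int)) : Prop :=
  out = find_all_odd_cycles_with_vsets_alt T
instance (T : List (List Int)) (out : List (Int × List Int)) :
    Decidable (Spec_find_all_odd_cycles_with_vsets T out) := by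
  unfold Spec_find_all_odd_cycles_with_vsets; infer_instance

-- ===== CLAIM (what is proved, stated in full; the proofs are below) =====
def Claim_equal_find_all_odd_cycles_with_vsets : Prop :=
  ∀ (T : List (List Int)), Dom_find_all_odd_cycles_with_vsets T →
    Pre_find_all_odd_cycles_with_vsets T →
    Spec_find_all_odd_cycles_with_vsets T (find_all_odd_cycles_with_vsets T)

-- ===== LEMMAS AND PROOFS =====

-- F T v m j: the value A's finished table holds at dp[m][j] (backward recurrence of A's forward DP)
def F (T : List (List Int)) (v : List Nat) (m j : Nat) : Int :=
  if h : m.testBit j = false then 0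
  else if m = 1 <<< j then (if j = 0 then 1 else 0)
  else if j = 0 then 0
  else ∑ i ∈ Finset.range v.length,
    (if (m ^^^ (1 <<< j)).testBit i ∧ (T.getD (v.getD i 0) []).getD (v.getD j 0) 0 ≠ 0
     then F T v (m ^^^ (1 <<< j)) i else 0)
termination_by m
decreasing_by exact pvXorLt m j (by simpa using h)


-- ---------- small bit-level helpers ----------
theorem pvTB1 (x i : Nat) : ((x >>> i) &&& 1 = 1) ↔ x.testBit i = true := by
  have h := Nat.and_one_is_mod (x >>> i)
  constructor
  · intro h1
    rcases Bool.eq_false_or_eq_true (x.testBit i) with hb | hb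
    · exact hb
    · have := (pvTB0 x i).mpr hb
      omega
  · intro h1
    have h2 : ¬((x >>> i) &&& 1 = 0) := fun hc => by
      rw [(pvTB0 x i).mp hc] at h1
      cases h1
    omega
theorem pvTBShift (j i : Nat) : (1 <<< j).testBit i = decide (j = i) := by
  rw [Nat.one_shiftLeft, Nat.testBit_two_pow]

theorem pvBitAnd (m i : Nat) : m &&& (1 <<< i) = 0 ↔ m.testBit i = false := by
  rw [Nat.one_shiftLeft]
  constructor
  · intro h
    have := congrArg (fun y => y.testBit i) h
    simpa [Nat.testBit_and, Nat.testBit_two_pow] using this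
  · intro h
    apply Nat.eq_of_testBit_eq
    intro j
    by_cases hj : j = i
    · subst hj; simp [Nat.testBit_and, h]
    · simp [Nat.testBit_and, Nat.testBit_two_pow, Ne.symm hj]

theorem pvOrXor (M j : Nat) (h : M.testBit j = false) :
    (M ||| (1 <<< j)) ^^^ (1 <<< j) = M := by
  apply Nat.eq_of_testBit_eq
  intro i
  by_cases hi : i = j
  · subst hi; simp [Nat.testBit_xor, Nat.testBit_or, Nat.one_shiftLeft, Nat.testBit_two_pow, h]
  · simp [Nat.testBit_xor, Nat.testBit_or, Nat.one_shiftLeft, Nat.testBit_two_pow, Ne.symm hi]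

theorem pvXorEqOr (m j : Nat) (h : m.testBit j = false) :
    m ^^^ (1 <<< j) = m ||| (1 <<< j) := by
  apply Nat.eq_of_testBit_eq
  intro i
  by_cases hi : i = j
  · subst hi; simp [Nat.testBit_xor, Nat.testBit_or, Nat.one_shiftLeft, Nat.testBit_two_pow, h]
  · simp [Nat.testBit_xor, Nat.testBit_or, Nat.one_shiftLeft, Nat.testBit_two_pow, Ne.symm hi]

theorem pvOrNe (M j : Nat) (h : M.testBit j = false) : M ||| (1 <<< j) ≠ M := by
  intro he
  have := congrArg (fun y => y.testBit j) he
  simp [Nat.testBit_or, Nat.one_shiftLeft, Nat.testBit_two_pow, h] at this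

theorem pvOrLt {kk : Nat} (M j : Nat) (hM : M < 2 ^ kk) (hj : j < kk) :
    M ||| (1 <<< j) < 2 ^ kk := by
  rw [Nat.one_shiftLeft]
  exact Nat.or_lt_two_pow hM (Nat.pow_lt_pow_right (by norm_num) hj)

theorem pvHighBitFalse {kk m i : Nat} (hm : m < 2 ^ kk) (hi : kk ≤ i) :
    m.testBit i = false := by
  apply Nat.testBit_lt_two_pow
  exact lt_of_lt_of_le hm (Nat.pow_le_pow_right (by norm_num) hi)

-- ---------- a list-map sum over range is a Finset sum ----------
theorem pvSumRange (n : Nat) (f : Nat → Int) :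
    ((List.range n).map f).sum = ∑ i ∈ Finset.range n, f i := by
  induction n with
  | zero => simp
  | succ n ih => simp [List.range_succ, Finset.sum_range_succ, ih]

-- ---------- foldl of a guarded accumulator is an init + map-sum ----------
theorem pvFoldlIfAdd {α : Type} (p : α → Prop) [DecidablePred p] (g : α → Int) :
    ∀ (L : List α) (init : Int),
      L.foldl (fun acc x => if p x then acc + g x else acc) init
        = init + (L.map (fun x => if p x then g x else 0)).sum := by
  intro L
  induction L with
  | nil => simp
  | cons x L ih =>
    intro init
    simp only [List.foldl_cons, List.map_cons, List.sum_cons]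
    by_cases hx : p x <;> simp [hx, ih] <;> ring

-- ---------- repeated append of one element is replicate ----------
theorem pvAppendN {α : Type} (x : α) :
    ∀ (N : Nat) (acc : List α),
      (List.range N).foldl (fun cy _ => cy ++ [x]) acc = acc ++ List.replicate N x := by
  intro N
  induction N with
  | zero => simp
  | succ N ih =>
    intro acc
    simp [List.range_succ, ih, List.replicate_succ']

-- ---------- the emission loop ----------
theorem pvEmit {β : Type} (item : β) (c : Nat → Int) (p : Nat → Prop) [DecidablePred p] :
    ∀ (L : List Nat), (∀ j ∈ L, 0 ≤ c j) → ∀ (acc : List β),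
      L.foldl (fun cy j => if p j then (List.range (c j).toNat).foldl (fun cy _ => cy ++ [item]) cy else cy) acc
        = acc ++ List.replicate ((L.map (fun j => if p j then c j else 0)).sum).toNat item := by
  intro L
  induction L with
  | nil => intro _ acc; simp
  | cons x L ih =>
    intro hc acc
    have hsum : 0 ≤ (L.map (fun j => if p j then c j else 0)).sum := by
      apply List.sum_nonneg
      intro y hy
      simp only [List.mem_map] at hy
      obtain ⟨j, hj, rfl⟩ := hy
      by_cases hp : p j
      · simpa [hp] using hc j (by simp [hj])
      · simp [hp]
    have hx0 : 0 ≤ (if p x then c x else 0) := by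
      by_cases hp : p x
      · simpa [hp] using hc x (by simp)
      · simp [hp]
    simp only [List.foldl_cons, List.map_cons, List.sum_cons]
    rw [ih (fun j hj => hc j (by simp [hj]))]
    rw [Int.toNat_add hx0 hsum]
    by_cases hp : p x
    · rw [if_pos hp, if_pos hp, pvAppendN, List.replicate_add, List.append_assoc]
    · rw [if_neg hp, if_neg hp]
      simp

-- ---------- table structure and read/write ----------
def ShT (kk : Nat) (t : List (List Int)) : Prop :=
  t.length = 2 ^ kk ∧ ∀ row ∈ t, row.length = kk

theorem pvShT_twrite {kk : Nat} {t : List (List Int)} {m j : Nat} {x : Int}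
    (h : ShT kk t) (hm : m < 2 ^ kk) : ShT kk (twrite t m j x) := by
  obtain ⟨hl, hr⟩ := h
  constructor
  · simp [twrite, hl]
  · intro row hrow
    rcases List.mem_or_eq_of_mem_set hrow with h1 | h1
    · exact hr row h1
    · subst h1
      have hmt : m < t.length := by omega
      rw [List.getD_eq_getElem _ _ hmt]
      simp [hr _ (List.getElem_mem hmt)]

theorem pvGetDSet {α : Type} (l : List α) (i : Nat) (a d : α) (hi : i < l.length) :
    ∀ n, (l.set i a).getD n d = if n = i then a else l.getD n d := by
  intro n
  rw [List.getD_eq_getElem?_getD, List.getD_eq_getElem?_getD]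
  by_cases hn : n = i
  · subst hn
    rw [if_pos rfl, List.getElem?_set_self (by omega)]
    simp
  · rw [if_neg hn, List.getElem?_set_ne (show i ≠ n from fun h => hn h.symm)]

theorem pvTreadTwrite {kk : Nat} {t : List (List Int)} {m j : Nat} {x : Int}
    (h : ShT kk t) (hm : m < 2 ^ kk) (hj : j < kk) (m' j' : Nat) :
    tread (twrite t m j x) m' j' = if m' = m ∧ j' = j then x else tread t m' j' := by
  obtain ⟨hl, hr⟩ := h
  have hmt : m < t.length := by omega
  have hrowlen : (t.getD m []).length = kk := by
    rw [List.getD_eq_getElem _ _ hmt]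
    exact hr _ (List.getElem_mem hmt)
  unfold tread twrite
  rw [pvGetDSet t m ((t.getD m []).set j x) [] hmt m']
  by_cases hmm : m' = m
  · rw [if_pos hmm]
    rw [pvGetDSet (t.getD m []) j x 0 (by omega) j']
    by_cases hjj : j' = j
    · rw [if_pos hjj, if_pos ⟨hmm, hjj⟩]
    · rw [if_neg hjj, if_neg (show ¬(m' = m ∧ j' = j) from fun hc => hjj hc.2), hmm]
  · rw [if_neg hmm, if_neg (show ¬(m' = m ∧ j' = j) from fun hc => hmm hc.1)]
-- ---------- the inner (nxt) loop ----------
theorem pvFoldNxt (T : List (List Int)) (v : List Nat) (M last : Nat) :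
    ∀ (L : List Nat), L.Nodup → (∀ x ∈ L, 1 ≤ x ∧ x < v.length) →
    ∀ t, ShT v.length t → M < 2 ^ v.length →
      ShT v.length (L.foldl (stepNxt T v M last) t) ∧
      ∀ m j, tread (L.foldl (stepNxt T v M last) t) m j =
        tread t m j +
          (if j ∈ L ∧ M &&& (1 <<< j) = 0 ∧ m = M ||| (1 <<< j) ∧
              (T.getD (v.getD last 0) []).getD (v.getD j 0) 0 ≠ 0
           then tread t M last else 0) := by
  intro L
  induction L with
  | nil =>
    intro _ _ t ht hM
    refine ⟨ht, fun m j => by simp⟩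
  | cons x L ih =>
    intro hnd hLm t ht hM
    obtain ⟨hx1, hxk⟩ := hLm x List.mem_cons_self
    have hndL : L.Nodup := hnd.of_cons
    have hxL : x ∉ L := (List.nodup_cons.mp hnd).1
    simp only [List.foldl_cons]
    by_cases hb : M &&& (1 <<< x) = 0
    · by_cases he : (T.getD (v.getD last 0) []).getD (v.getD x 0) 0 ≠ 0
      · -- the writing step
        have hbitF : M.testBit x = false := (pvBitAnd M x).mp hb
        have hstep : stepNxt T v M last t x =
            twrite t (M ||| (1 <<< x)) x
              (tread t (M ||| (1 <<< x)) x + tread t M last) := by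
          unfold stepNxt
          rw [if_neg (show ¬(M &&& (1 <<< x) ≠ 0) from fun hc => hc hb), if_pos he]
        rw [hstep]
        have hMx : M ||| (1 <<< x) < 2 ^ v.length := pvOrLt M x hM hxk
        have hsh1 := pvShT_twrite (x := tread t (M ||| (1 <<< x)) x + tread t M last)
          (j := x) ht hMx
        have hMne : M ||| (1 <<< x) ≠ M := pvOrNe M x hbitF
        have htr := pvTreadTwrite (x := tread t (M ||| (1 <<< x)) x + tread t M last)
          ht hMx hxk
        obtain ⟨hsh, hread⟩ := ih hndL (fun y hy => hLm y (List.mem_cons_of_mem x hy)) _ hsh1 hM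
        refine ⟨hsh, fun m j => ?_⟩
        have hMlast : tread (twrite t (M ||| (1 <<< x)) x
            (tread t (M ||| (1 <<< x)) x + tread t M last)) M last = tread t M last := by
          rw [htr M last, if_neg (show ¬(M = M ||| (1 <<< x) ∧ last = x) from
            fun hc => hMne hc.1.symm)]
        rw [hread m j, hMlast, htr m j]
        by_cases hj : j = x
        · have hjL : j ∉ L := by rw [hj]; exact hxL
          have hjmem : j ∈ x :: L := by rw [hj]; exact List.mem_cons_self
          by_cases hm : m = M ||| (1 <<< x)
          · rw [if_pos ⟨hm, hj⟩,
              if_neg (show ¬(j ∈ L ∧ _ ∧ _ ∧ _) from fun hc => hjL hc.1),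
              if_pos ⟨hjmem, by rw [hj]; exact hb, by rw [hj]; exact hm,
                by rw [hj]; exact he⟩, hm, hj]
            ring
          · rw [if_neg (show ¬(m = M ||| (1 <<< x) ∧ j = x) from fun hc => hm hc.1),
              if_neg (show ¬(j ∈ L ∧ _ ∧ _ ∧ _) from fun hc => hjL hc.1),
              if_neg (show ¬(j ∈ x :: L ∧ _ ∧ m = M ||| (1 <<< j) ∧ _) from
                fun hc => hm (by rw [← hj]; exact hc.2.2.1))]
        · rw [if_neg (show ¬(m = M ||| (1 <<< x) ∧ j = x) from fun hc => hj hc.2)]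
          congr 1
          simp only [List.mem_cons, hj, false_or]
      · have hstep : stepNxt T v M last t x = t := by
          unfold stepNxt
          rw [if_neg (show ¬(M &&& (1 <<< x) ≠ 0) from fun hc => hc hb), if_neg he]
        rw [hstep]
        obtain ⟨hsh, hread⟩ := ih hndL (fun y hy => hLm y (List.mem_cons_of_mem x hy)) t ht hM
        refine ⟨hsh, fun m j => ?_⟩
        rw [hread m j]
        congr 1
        by_cases hj : j = x
        · rw [if_neg (show ¬(j ∈ L ∧ _ ∧ _ ∧ _) from fun hc => he (by rw [← hj]; exact hc.2.2.2)),
            if_neg (show ¬(j ∈ x :: L ∧ _ ∧ _ ∧ _) from fun hc => he (by rw [← hj]; exact hc.2.2.2))]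
        · simp only [List.mem_cons, hj, false_or]
    · have hstep : stepNxt T v M last t x = t := by
        unfold stepNxt
        rw [if_pos (show M &&& (1 <<< x) ≠ 0 from hb)]
      rw [hstep]
      obtain ⟨hsh, hread⟩ := ih hndL (fun y hy => hLm y (List.mem_cons_of_mem x hy)) t ht hM
      refine ⟨hsh, fun m j => ?_⟩
      rw [hread m j]
      congr 1
      by_cases hj : j = x
      · rw [if_neg (show ¬(j ∈ L ∧ _ ∧ _ ∧ _) from fun hc => hb (by rw [← hj]; exact hc.2.1)),
          if_neg (show ¬(j ∈ x :: L ∧ _ ∧ _ ∧ _) from fun hc => hb (by rw [← hj]; exact hc.2.1))]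
      · simp only [List.mem_cons, hj, false_or]
-- ---------- the middle (last) loop ----------
theorem pvFoldLast (T : List (List Int)) (v : List Nat) (M : Nat) :
    ∀ (L : List Nat), (∀ x ∈ L, x < v.length) →
    ∀ t, ShT v.length t → M < 2 ^ v.length →
      ShT v.length (L.foldl (stepLast T v M) t) ∧
      ∀ m j, tread (L.foldl (stepLast T v M) t) m j =
        tread t m j +
          (if M &&& (1 <<< j) = 0 ∧ m = M ||| (1 <<< j) ∧ 1 ≤ j ∧ j < v.length then
            (L.map (fun last =>
              if (¬(tread t M last = 0 ∨ M &&& (1 <<< last) = 0)) ∧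
                  (T.getD (v.getD last 0) []).getD (v.getD j 0) 0 ≠ 0
              then tread t M last else 0)).sum
          else 0) := by
  intro L
  induction L with
  | nil =>
    intro _ t ht hM
    refine ⟨ht, fun m j => ?_⟩
    by_cases hc : M &&& (1 <<< j) = 0 ∧ m = M ||| (1 <<< j) ∧ 1 ≤ j ∧ j < v.length
    · rw [if_pos hc]; simp
    · rw [if_neg hc]; simp
  | cons x L ih =>
    intro hLm t ht hM
    have hxk := hLm x List.mem_cons_self
    simp only [List.foldl_cons]
    by_cases hg : tread t M x = 0 ∨ M &&& (1 <<< x) = 0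
    · have hstep : stepLast T v M t x = t := by
        unfold stepLast
        rw [if_pos hg]
      rw [hstep]
      obtain ⟨hsh, hread⟩ := ih (fun y hy => hLm y (List.mem_cons_of_mem x hy)) t ht hM
      refine ⟨hsh, fun m j => ?_⟩
      rw [hread m j]
      congr 1
      by_cases hc : M &&& (1 <<< j) = 0 ∧ m = M ||| (1 <<< j) ∧ 1 ≤ j ∧ j < v.length
      · rw [if_pos hc, if_pos hc]
        simp only [List.map_cons, List.sum_cons]
        rw [if_neg (show ¬(¬(tread t M x = 0 ∨ M &&& (1 <<< x) = 0) ∧ _) from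
          fun hc2 => hc2.1 hg)]
        ring
      · rw [if_neg hc, if_neg hc]
    · have hstep : stepLast T v M t x =
          (List.range' 1 (v.length - 1)).foldl (stepNxt T v M x) t := by
        unfold stepLast
        rw [if_neg hg]
      rw [hstep]
      have hnd : (List.range' 1 (v.length - 1)).Nodup := List.nodup_range'
      have hmemr : ∀ y ∈ List.range' 1 (v.length - 1), 1 ≤ y ∧ y < v.length := by
        intro y hy
        rw [List.mem_range'_1] at hy
        omega
      obtain ⟨hsh1, hread1⟩ := pvFoldNxt T v M x _ hnd hmemr t ht hM
      obtain ⟨hsh, hread⟩ := ih (fun y hy => hLm y (List.mem_cons_of_mem x hy))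
        ((List.range' 1 (v.length - 1)).foldl (stepNxt T v M x) t) hsh1 hM
      refine ⟨hsh, fun m j => ?_⟩
      have hMread : ∀ last', tread ((List.range' 1 (v.length - 1)).foldl (stepNxt T v M x) t) M last'
          = tread t M last' := by
        intro last'
        rw [hread1 M last',
          if_neg (show ¬(last' ∈ _ ∧ _ ∧ M = M ||| (1 <<< last') ∧ _) from ?_), add_zero]
        rintro ⟨-, hc0, hc1, -⟩
        exact pvOrNe M last' ((pvBitAnd M last').mp hc0) hc1.symm
      rw [hread m j]
      simp only [hMread]
      rw [hread1 m j]
      by_cases hc : M &&& (1 <<< j) = 0 ∧ m = M ||| (1 <<< j) ∧ 1 ≤ j ∧ j < v.length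
      · obtain ⟨hc0, hc1, hc2, hc3⟩ := hc
        rw [if_pos (show M &&& (1 <<< j) = 0 ∧ m = M ||| (1 <<< j) ∧ 1 ≤ j ∧ j < v.length from
              ⟨hc0, hc1, hc2, hc3⟩),
          if_pos (show M &&& (1 <<< j) = 0 ∧ m = M ||| (1 <<< j) ∧ 1 ≤ j ∧ j < v.length from
              ⟨hc0, hc1, hc2, hc3⟩)]
        simp only [List.map_cons, List.sum_cons]
        have hjmem : j ∈ List.range' 1 (v.length - 1) := by
          rw [List.mem_range'_1]
          omega
        by_cases he : (T.getD (v.getD x 0) []).getD (v.getD j 0) 0 ≠ 0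
        · rw [if_pos (show j ∈ List.range' 1 (v.length - 1) ∧ M &&& (1 <<< j) = 0 ∧
                m = M ||| (1 <<< j) ∧ (T.getD (v.getD x 0) []).getD (v.getD j 0) 0 ≠ 0 from
                ⟨hjmem, hc0, hc1, he⟩),
            if_pos (show ¬(tread t M x = 0 ∨ M &&& (1 <<< x) = 0) ∧
                (T.getD (v.getD x 0) []).getD (v.getD j 0) 0 ≠ 0 from ⟨hg, he⟩)]
          ring
        · rw [if_neg (show ¬(j ∈ List.range' 1 (v.length - 1) ∧ M &&& (1 <<< j) = 0 ∧
                m = M ||| (1 <<< j) ∧ (T.getD (v.getD x 0) []).getD (v.getD j 0) 0 ≠ 0) from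
                fun hcc => he hcc.2.2.2),
            if_neg (show ¬(¬(tread t M x = 0 ∨ M &&& (1 <<< x) = 0) ∧
                (T.getD (v.getD x 0) []).getD (v.getD j 0) 0 ≠ 0) from fun hcc => he hcc.2)]
          ring
      · rw [if_neg hc, if_neg hc,
          if_neg (show ¬(j ∈ List.range' 1 (v.length - 1) ∧ M &&& (1 <<< j) = 0 ∧
            m = M ||| (1 <<< j) ∧ (T.getD (v.getD x 0) []).getD (v.getD j 0) 0 ≠ 0) from ?_)]
        · ring
        · rintro ⟨hm1, hcc0, hcc1, -⟩
          rw [List.mem_range'_1] at hm1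
          exact hc ⟨hcc0, hcc1, by omega, by omega⟩
-- ---------- the invariant of A's forward DP ----------
def pvInv (T : List (List Int)) (v : List Nat) (M : Nat) (t : List (List Int)) : Prop :=
  ShT v.length t ∧ ∀ m j, m < 2 ^ v.length → j < v.length →
    tread t m j =
      if m.testBit j = true ∧ m ^^^ (1 <<< j) < M then F T v m j
      else (if m = 1 ∧ j = 0 then 1 else 0)

theorem pvTreadRepl (N kk m j : Nat) :
    tread (List.replicate N (List.replicate kk (0 : Int))) m j = 0 := by
  unfold tread
  have h1 : (List.replicate N (List.replicate kk (0 : Int))).getD m [] =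
      if m < N then List.replicate kk (0 : Int) else [] := by
    by_cases h : m < N
    · rw [if_pos h, List.getD_eq_getElem _ _ (by simpa using h)]
      simp
    · rw [if_neg h, List.getD_eq_default _ _ (by simp; omega)]
  rw [h1]
  by_cases h : m < N
  · rw [if_pos h]
    by_cases h2 : j < kk
    · rw [List.getD_eq_getElem _ _ (by simpa using h2)]
      simp
    · rw [List.getD_eq_default _ _ (by simp; omega)]
  · rw [if_neg h]
    simp
theorem pvShTRepl (kk : Nat) :
    ShT kk (List.replicate (2 ^ kk) (List.replicate kk (0 : Int))) := by
  refine ⟨by simp, ?_⟩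
  intro row hrow
  rw [List.eq_of_mem_replicate hrow]
  simp

theorem pvInvInit (T : List (List Int)) (v : List Nat) (h1 : 1 ≤ v.length) :
    pvInv T v 1
      (twrite (List.replicate (2 ^ v.length) (List.replicate v.length (0 : Int))) 1 0 1) := by
  have h2 : 1 < 2 ^ v.length := Nat.one_lt_two_pow (by omega)
  refine ⟨pvShT_twrite (pvShTRepl v.length) h2, ?_⟩
  intro m j hm hj
  rw [pvTreadTwrite (pvShTRepl v.length) h2 (by omega) m j, pvTreadRepl]
  by_cases hcond : m.testBit j = true ∧ m ^^^ (1 <<< j) < 1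
  · rw [if_pos hcond]
    obtain ⟨hbit, hlt⟩ := hcond
    have hmj : m = 1 <<< j := by
      have h0 : m ^^^ (1 <<< j) = 0 := by omega
      exact (Nat.xor_eq_zero_iff).mp h0
    rw [F, dif_neg (by simp [hbit]), if_pos hmj]
    by_cases hj0 : j = 0
    · rw [if_pos hj0]
      have hm1 : m = 1 := by
        rw [hmj, hj0]
        decide
      rw [if_pos ⟨hm1, hj0⟩]
    · rw [if_neg hj0, if_neg (show ¬(m = 1 ∧ j = 0) from fun hc => hj0 hc.2)]
  · rw [if_neg hcond]
theorem pvInvStep (T : List (List Int)) (v : List Nat) {M : Nat} {t : List (List Int)}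
    (hM1 : 1 ≤ M) (hM : M < 2 ^ v.length) (h : pvInv T v M t) :
    pvInv T v (M + 1) (stepMask T v t M) := by
  obtain ⟨hsh, hread⟩ := h
  obtain ⟨hsh', hread'⟩ := pvFoldLast T v M (List.range v.length)
    (by intro x hx; exact List.mem_range.mp hx) t hsh hM
  refine ⟨hsh', ?_⟩
  intro m j hm hj
  unfold stepMask
  rw [hread' m j]
  by_cases hc : M &&& (1 <<< j) = 0 ∧ m = M ||| (1 <<< j) ∧ 1 ≤ j ∧ j < v.length
  · obtain ⟨hc0, hc1, hc2, hc3⟩ := hc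
    have hbitMj : M.testBit j = false := (pvBitAnd M j).mp hc0
    have hbitmj : m.testBit j = true := by
      rw [hc1, Nat.testBit_or, pvTBShift]
      simp
    have hxor : m ^^^ (1 <<< j) = M := by
      rw [hc1]
      exact pvOrXor M j hbitMj
    have hold : tread t m j = 0 := by
      rw [hread m j hm hj,
        if_neg (show ¬(m.testBit j = true ∧ m ^^^ (1 <<< j) < M) from by
          rintro ⟨-, hlt⟩; rw [hxor] at hlt; omega),
        if_neg (show ¬(m = 1 ∧ j = 0) from by rintro ⟨-, hj0⟩; omega)]
    rw [hold, zero_add, if_pos ⟨hc0, hc1, hc2, hc3⟩]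
    have hmne : m ≠ 1 <<< j := by
      intro hme
      rw [hme] at hxor
      simp at hxor
      omega
    rw [if_pos ⟨hbitmj, by rw [hxor]; omega⟩, F, dif_neg (by simp [hbitmj]),
      if_neg hmne, if_neg (show ¬(j = 0) from by omega), hxor, ← pvSumRange]
    congr 1
    apply List.map_congr_left
    intro last hlast
    have hlastk : last < v.length := List.mem_range.mp hlast
    have hval := hread M last hM hlastk
    by_cases hbl : M.testBit last = true
    · have hltM : M ^^^ (1 <<< last) < M := pvXorLt M last hbl
      rw [if_pos ⟨hbl, hltM⟩] at hval
      have hbne : M &&& (1 <<< last) ≠ 0 := by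
        rw [Ne, pvBitAnd, hbl]
        simp
      rw [hval]
      by_cases he : (T.getD (v.getD last 0) []).getD (v.getD j 0) 0 ≠ 0
      · by_cases hF : F T v M last = 0
        · rw [hF,
            if_neg (show ¬(¬((0:Int) = 0 ∨ M &&& (1 <<< last) = 0) ∧ _) from
              fun hc2 => hc2.1 (Or.inl rfl))]
          by_cases hcc : M.testBit last = true ∧
              (T.getD (v.getD last 0) []).getD (v.getD j 0) 0 ≠ 0
          · rw [if_pos hcc]
          · rw [if_neg hcc]
        · rw [if_pos ⟨show ¬(F T v M last = 0 ∨ M &&& (1 <<< last) = 0) from by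
              rintro (h1 | h1); exact hF h1; exact hbne h1, he⟩,
            if_pos ⟨hbl, he⟩]
      · rw [if_neg (show ¬(¬_ ∧ _) from fun hcc => he hcc.2),
          if_neg (show ¬(_ ∧ _) from fun hcc => he hcc.2)]
    · have hbz : M &&& (1 <<< last) = 0 :=
        (pvBitAnd M last).mpr (by simpa using hbl)
      rw [if_neg (show ¬(M.testBit last = true ∧ M ^^^ (1 <<< last) < M) from
        fun hcc => hbl hcc.1)] at hval
      rw [hval,
        if_neg (show ¬(¬(_ ∨ M &&& (1 <<< last) = 0) ∧ _) from
          fun hcc => hcc.1 (Or.inr hbz)),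
        if_neg (show ¬(M.testBit last = true ∧ _) from fun hcc => hbl hcc.1)]
  · rw [if_neg hc, add_zero, hread m j hm hj]
    by_cases hnew : m.testBit j = true ∧ m ^^^ (1 <<< j) < M + 1
    · by_cases hold : m ^^^ (1 <<< j) < M
      · rw [if_pos ⟨hnew.1, hold⟩, if_pos hnew]
      · have hxeq : m ^^^ (1 <<< j) = M := by omega
        have hbitMj : M.testBit j = false := by
          have hh := congrArg (fun y => y.testBit j) hxeq
          simp only [Nat.testBit_xor, pvTBShift] at hh
          rw [hnew.1] at hh
          simpa using hh.symm
        have hm1 : m = M ||| (1 <<< j) := by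
          have h2 : m = M ^^^ (1 <<< j) := by
            rw [← hxeq, Nat.xor_assoc]
            simp
          rw [h2, pvXorEqOr M j hbitMj]
        have hj0 : j = 0 := by
          by_contra hj0
          exact hc ⟨(pvBitAnd M j).mpr hbitMj, hm1, by omega, hj⟩
        subst hj0
        have hmne1 : m ≠ 1 := by
          intro hme
          rw [hme] at hxeq
          simp [Nat.one_shiftLeft] at hxeq
          omega
        rw [if_pos hnew, if_neg (show ¬(m = 1 ∧ (0:Nat) = 0) from
            fun hcc => hmne1 hcc.1), F,
          dif_neg (by simp [hnew.1]),
          if_neg (show ¬(m = 1 <<< 0) from by simpa [Nat.one_shiftLeft] using hmne1),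
          if_pos rfl,
          if_neg (show ¬(m.testBit 0 = true ∧ m ^^^ (1 <<< 0) < M) from
            fun hcc => hold hcc.2)]
    · rw [if_neg (show ¬(m.testBit j = true ∧ m ^^^ (1 <<< j) < M) from
          fun hcc => hnew ⟨hcc.1, by omega⟩),
        if_neg hnew]
theorem pvInvRun (T : List (List Int)) (v : List Nat) :
    ∀ (c M : Nat) (t : List (List Int)), 1 ≤ M → M + c ≤ 2 ^ v.length → pvInv T v M t →
      pvInv T v (M + c) ((List.range' M c).foldl (stepMask T v) t) := by
  intro c
  induction c with
  | zero => intro M t _ _ h; simpa using h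
  | succ c ih =>
    intro M t h1 h2 h
    rw [List.range'_succ]
    simp only [List.foldl_cons]
    have hMeq : M + (c + 1) = (M + 1) + c := by omega
    rw [hMeq]
    exact ih (M + 1) _ (by omega) (by omega) (pvInvStep T v h1 (by omega) h)

theorem pvDpFinal (T : List (List Int)) (v : List Nat) (h1 : 1 ≤ v.length)
    (j : Nat) (hj1 : 1 ≤ j) (hj : j < v.length) :
    tread (dpRun T v) (2 ^ v.length - 1) j = F T v (2 ^ v.length - 1) j := by
  have h2 : 1 ≤ 2 ^ v.length := Nat.one_le_two_pow
  have hrun := pvInvRun T v (2 ^ v.length - 1) 1 _ le_rfl (by omega) (pvInvInit T v h1)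
  obtain ⟨-, hread⟩ := hrun
  have hfull : (2 : Nat) ^ v.length - 1 < 2 ^ v.length := by omega
  have hbit : (2 ^ v.length - 1 : Nat).testBit j = true := by
    simp [Nat.testBit_two_pow_sub_one]
    omega
  have hval := hread (2 ^ v.length - 1) j hfull hj
  rw [show (1 + (2 ^ v.length - 1)) = 2 ^ v.length from by omega] at hval
  unfold dpRun
  rw [hval, if_pos ⟨hbit, by have := pvXorLt (2 ^ v.length - 1) j hbit; omega⟩]

theorem pvFNonneg (T : List (List Int)) (v : List Nat) : ∀ m j, 0 ≤ F T v m j := by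
  intro m
  induction m using Nat.strong_induction_on with
  | _ m ih =>
    intro j
    rw [F]
    split_ifs with h1 h2 h3 h4
    · omega
    · omega
    · omega
    · omega
    · apply Finset.sum_nonneg
      intro i _
      split_ifs with h5
      · exact ih _ (pvXorLt m j (by simpa using h1)) i
      · omega
-- ---------- the global bitmask of one subset ----------
def lift (v : List Nat) (m : Nat) : Nat :=
  (List.range v.length).foldl (fun a i => if m.testBit i then a ||| (1 <<< (v.getD i 0)) else a) 0

theorem pvTestBitFoldOr (v : List Nat) (m : Nat) :
    ∀ (L : List Nat) (a : Nat) (p : Nat),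
      (L.foldl (fun a i => if m.testBit i then a ||| (1 <<< (v.getD i 0)) else a) a).testBit p =
        (a.testBit p || L.any (fun i => m.testBit i && decide (v.getD i 0 = p))) := by
  intro L
  induction L with
  | nil => intro a p; simp
  | cons x L ih =>
    intro a p
    simp only [List.foldl_cons, List.any_cons]
    by_cases hx : m.testBit x = true
    · rw [if_pos hx, ih, Nat.testBit_or, pvTBShift, hx]
      simp [Bool.or_assoc]
    · have hx' : m.testBit x = false := by simpa using hx
      rw [if_neg (show ¬(m.testBit x = true) from by rw [hx']; simp), ih, hx']
      simp
theorem pvTestBitLift (v : List Nat) (m p : Nat) :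
    (lift v m).testBit p = true ↔
      ∃ i, i < v.length ∧ m.testBit i = true ∧ v.getD i 0 = p := by
  unfold lift
  rw [pvTestBitFoldOr]
  simp [List.any_eq_true, List.mem_range]

theorem pvLiftTwoPow (v : List Nat) (j : Nat) (hj : j < v.length)
    (hinj : ∀ i1 i2, i1 < v.length → i2 < v.length → v.getD i1 0 = v.getD i2 0 → i1 = i2) :
    lift v (1 <<< j) = 1 <<< (v.getD j 0) := by
  apply Nat.eq_of_testBit_eq
  intro p
  rw [pvTBShift]
  by_cases hp : v.getD j 0 = p
  · have h1 : (lift v (1 <<< j)).testBit p = true := by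
      rw [pvTestBitLift]
      exact ⟨j, hj, by rw [pvTBShift]; simp, hp⟩
    rw [h1, hp]
    simp
  · have h1 : (lift v (1 <<< j)).testBit p = false := by
      rw [← Bool.not_eq_true, pvTestBitLift]
      rintro ⟨i, hi, hb, hv⟩
      rw [pvTBShift] at hb
      have hij : j = i := by simpa using hb
      exact hp (by rw [hij]; exact hv)
    rw [h1]
    symm
    rw [decide_eq_false_iff_not]
    exact hp
theorem pvLiftEqTwoPowIff (v : List Nat) (m j : Nat) (hm : m < 2 ^ v.length)
    (hj : j < v.length) (hbit : m.testBit j = true)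
    (hinj : ∀ i1 i2, i1 < v.length → i2 < v.length → v.getD i1 0 = v.getD i2 0 → i1 = i2) :
    lift v m = 1 <<< (v.getD j 0) ↔ m = 1 <<< j := by
  constructor
  · intro h
    apply Nat.eq_of_testBit_eq
    intro i
    rw [Nat.one_shiftLeft, Nat.testBit_two_pow]
    by_cases hik : i < v.length
    · by_cases hbi : m.testBit i = true
      · have : (lift v m).testBit (v.getD i 0) = true := by
          rw [pvTestBitLift]
          exact ⟨i, hik, hbi, rfl⟩
        rw [h, Nat.one_shiftLeft, Nat.testBit_two_pow] at this
        have hvij : v.getD j 0 = v.getD i 0 := by simpa using this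
        have : j = i := hinj j i hj hik hvij
        simp [this, hbi]
      · rw [Bool.not_eq_true] at hbi
        rw [hbi]
        by_cases hij : j = i
        · subst hij; rw [hbit] at hbi; cases hbi
        · simp [hij]
    · rw [pvHighBitFalse hm (by omega)]
      by_cases hij : j = i
      · subst hij; omega
      · simp [hij]
  · intro h
    subst h
    exact pvLiftTwoPow v j hj hinj

theorem pvLiftXor (v : List Nat) (m j : Nat) (hm : m < 2 ^ v.length) (hj : j < v.length)
    (hbit : m.testBit j = true)
    (hinj : ∀ i1 i2, i1 < v.length → i2 < v.length → v.getD i1 0 = v.getD i2 0 → i1 = i2) :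
    lift v m ^^^ (1 <<< (v.getD j 0)) = lift v (m ^^^ (1 <<< j)) := by
  apply Nat.eq_of_testBit_eq
  intro p
  rw [Nat.testBit_xor, pvTBShift]
  by_cases hp : p = v.getD j 0
  · subst hp
    have h1 : (lift v m).testBit (v.getD j 0) = true := by
      rw [pvTestBitLift]; exact ⟨j, hj, hbit, rfl⟩
    have h2 : (lift v (m ^^^ (1 <<< j))).testBit (v.getD j 0) = false := by
      rw [← Bool.not_eq_true, pvTestBitLift]
      rintro ⟨i, hi, hb, hv⟩
      have hij : i = j := hinj i j hi hj hv
      rw [hij, Nat.testBit_xor, pvTBShift, hbit] at hb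
      simp at hb
    rw [h1, h2]
    simp
  · have hd : decide (v.getD j 0 = p) = false := by
      simp
      intro hh
      exact absurd hh.symm hp
    rw [hd, Bool.xor_false]
    by_cases hlp : (lift v m).testBit p = true
    · rw [hlp]
      rw [pvTestBitLift] at hlp
      obtain ⟨i, hi, hb, hv⟩ := hlp
      have hij : i ≠ j := fun hh => hp (by rw [← hv, hh])
      symm
      rw [pvTestBitLift]
      refine ⟨i, hi, ?_, hv⟩
      rw [Nat.testBit_xor, pvTBShift, hb]
      have : decide (j = i) = false := by simp; omega
      rw [this]
      simp
    · rw [Bool.not_eq_true] at hlp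
      rw [hlp]
      symm
      rw [← Bool.not_eq_true, pvTestBitLift]
      rintro ⟨i, hi, hb, hv⟩
      rw [Nat.testBit_xor, pvTBShift] at hb
      have hij : i ≠ j := fun hh => hp (by rw [← hv, hh])
      have hdji : decide (j = i) = false := by simp; omega
      rw [hdji] at hb
      simp only [Bool.xor_false] at hb
      have : (lift v m).testBit p = true := by
        rw [pvTestBitLift]; exact ⟨i, hi, hb, hv⟩
      rw [hlp] at this
      cases this
-- ---------- A's table recurrence equals B's path recursion ----------
theorem pvFEqAlt (T : List (List Int)) (v : List Nat) (n : Nat)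
    (hbv : ∀ i, i < v.length → v.getD i 0 < n)
    (hinj : ∀ i1 i2, i1 < v.length → i2 < v.length → v.getD i1 0 = v.getD i2 0 → i1 = i2) :
    ∀ m, m < 2 ^ v.length → ∀ j, j < v.length → m.testBit j = true →
      F T v m j = altPaths T n (v.getD 0 0) (lift v m) (v.getD j 0) := by
  intro m
  induction m using Nat.strong_induction_on with
  | _ m ih =>
    intro hm j hj hbit
    have h0k : 0 < v.length := by omega
    have hliftbit : (lift v m).testBit (v.getD j 0) = true := by
      rw [pvTestBitLift]; exact ⟨j, hj, hbit, rfl⟩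
    rw [F, altPaths, dif_neg (by simp [hbit]),
      dif_neg (by rw [pvTB0, hliftbit]; simp)]
    by_cases hmj : m = 1 <<< j
    · rw [if_pos hmj, if_pos ((pvLiftEqTwoPowIff v m j hm hj hbit hinj).mpr hmj)]
      by_cases hj0 : j = 0
      · rw [if_pos hj0, if_pos (by rw [hj0])]
      · rw [if_neg hj0, if_neg (show ¬(v.getD j 0 = v.getD 0 0) from
          fun hh => hj0 (hinj j 0 hj h0k hh))]
    · rw [if_neg hmj,
        if_neg (show ¬(lift v m = 1 <<< v.getD j 0) from
          fun hh => hmj ((pvLiftEqTwoPowIff v m j hm hj hbit hinj).mp hh))]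
      by_cases hj0 : j = 0
      · rw [if_pos hj0, if_pos (by rw [hj0])]
      · rw [if_neg hj0, if_neg (show ¬(v.getD j 0 = v.getD 0 0) from
          fun hh => hj0 (hinj j 0 hj h0k hh))]
        rw [pvFoldlIfAdd
          (fun prev => ((lift v m ^^^ (1 <<< v.getD j 0)) >>> prev) &&& 1 = 1 ∧
            (T.getD prev []).getD (v.getD j 0) 0 ≠ 0)
          (fun prev => altPaths T n (v.getD 0 0) (lift v m ^^^ (1 <<< v.getD j 0)) prev),
          zero_add, pvSumRange,
          show lift v m ^^^ (1 <<< v.getD j 0) = lift v (m ^^^ (1 <<< j)) from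
            pvLiftXor v m j hm hj hbit hinj]
        have hpm : m ^^^ (1 <<< j) < m := pvXorLt m j hbit
        have hpmlt : m ^^^ (1 <<< j) < 2 ^ v.length := by omega
        apply Finset.sum_of_injOn (fun i => v.getD i 0)
        · intro a ha b hb hab
          simp only [Finset.coe_range, Set.mem_Iio] at ha hb
          exact hinj a b ha hb hab
        · intro a ha
          simp only [Finset.coe_range, Set.mem_Iio] at ha ⊢
          exact hbv a ha
        · intro p hp hni
          rw [if_neg]
          rintro ⟨h1, -⟩
          have hb : (lift v (m ^^^ (1 <<< j))).testBit p = true := (pvTB1 _ _).mp h1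
          rw [pvTestBitLift] at hb
          obtain ⟨i, hi, hbi, hv⟩ := hb
          exact hni ⟨i, by simpa using hi, hv⟩
        · intro i hi
          have hik : i < v.length := Finset.mem_range.mp hi
          by_cases hbi : (m ^^^ (1 <<< j)).testBit i = true
          · have hliftpm : (lift v (m ^^^ (1 <<< j))).testBit (v.getD i 0) = true := by
              rw [pvTestBitLift]; exact ⟨i, hik, hbi, rfl⟩
            by_cases he : (T.getD (v.getD i 0) []).getD (v.getD j 0) 0 ≠ 0
            · rw [if_pos ⟨hbi, he⟩, if_pos ⟨(pvTB1 _ _).mpr hliftpm, he⟩]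
              exact ih (m ^^^ (1 <<< j)) hpm hpmlt i hik hbi
            · rw [if_neg (show ¬(_ ∧ _) from fun hc => he hc.2),
                if_neg (show ¬(_ ∧ _) from fun hc => he hc.2)]
          · rw [if_neg (show ¬(_ ∧ _) from fun hc => hbi hc.1),
              if_neg (show ¬(((lift v (m ^^^ (1 <<< j))) >>> (v.getD i 0)) &&& 1 = 1 ∧ _) from ?_)]
            rintro ⟨h1, -⟩
            have hb : (lift v (m ^^^ (1 <<< j))).testBit (v.getD i 0) = true := (pvTB1 _ _).mp h1
            rw [pvTestBitLift] at hb
            obtain ⟨i', hi', hbi', hv'⟩ := hb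
            have : i' = i := hinj i' i hi' hik hv'
            rw [this] at hbi'
            exact hbi hbi'
-- ---------- full-subset mask ----------
theorem pvTestBitFoldOr2 :
    ∀ (L : List Nat) (a p : Nat),
      (L.foldl (fun m x => m ||| (1 <<< x)) a).testBit p =
        (a.testBit p || L.any (fun x => decide (x = p))) := by
  intro L
  induction L with
  | nil => intro a p; simp
  | cons x L ih =>
    intro a p
    simp only [List.foldl_cons, List.any_cons]
    rw [ih]
    simp [Nat.testBit_or, Nat.one_shiftLeft, Nat.testBit_two_pow, Bool.or_assoc]

theorem pvLiftFull (v : List Nat) :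
    lift v (2 ^ v.length - 1) = v.foldl (fun m x => m ||| (1 <<< x)) 0 := by
  apply Nat.eq_of_testBit_eq
  intro p
  rw [pvTestBitFoldOr2]
  unfold lift
  rw [pvTestBitFoldOr]
  simp only [Nat.zero_testBit, Bool.false_or]
  rw [Bool.eq_iff_iff]
  simp only [List.any_eq_true, List.mem_range, Bool.and_eq_true, decide_eq_true_eq]
  constructor
  · rintro ⟨i, hi, -, hv⟩
    refine ⟨v.getD i 0, ?_, hv⟩
    rw [List.getD_eq_getElem _ _ hi]
    exact List.getElem_mem hi
  · rintro ⟨x, hx, rfl⟩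
    obtain ⟨i, hi, rfl⟩ := List.mem_iff_getElem.mp hx
    refine ⟨i, hi, ?_, by rw [List.getD_eq_getElem _ _ hi]⟩
    simp [Nat.testBit_two_pow_sub_one]
    omega

theorem pvHeadD (v : List Nat) : v.headD 0 = v.getD 0 0 := by
  cases v <;> rfl

theorem pvDropMap (v : List Nat) :
    (List.range' 1 (v.length - 1)).map (fun j => v.getD j 0) = v.drop 1 := by
  apply List.ext_getElem
  · simp
  · intro i h1 h2
    simp only [List.getElem_map, List.getElem_range', List.getElem_drop]
    rw [List.getD_eq_getElem]
    · congr 1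
      simp at h1
      omega
    · simp at h1 ⊢
      omega

-- ---------- facts about itertools.combinations ----------
theorem pvCombsSublist : ∀ (l : List Nat), ∀ (k : Nat) (c : List Nat),
    c ∈ combs k l → c.Sublist l := by
  intro l
  induction l with
  | nil =>
    intro k c hc
    cases k with
    | zero => simp [combs] at hc; simp [hc]
    | succ k => simp [combs] at hc
  | cons x xs ih =>
    intro k c hc
    cases k with
    | zero => simp [combs] at hc; simp [hc]
    | succ k =>
      rw [combs] at hc
      rcases List.mem_append.mp hc with h | h
      · obtain ⟨c', hc', rfl⟩ := List.mem_map.mp h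
        exact (ih k c' hc').cons₂ x
      · exact (ih (k + 1) c h).cons x

theorem pvCombsLength : ∀ (l : List Nat), ∀ (k : Nat) (c : List Nat),
    c ∈ combs k l → c.length = k := by
  intro l
  induction l with
  | nil =>
    intro k c hc
    cases k with
    | zero => simp [combs] at hc; simp [hc]
    | succ k => simp [combs] at hc
  | cons x xs ih =>
    intro k c hc
    cases k with
    | zero => simp [combs] at hc; simp [hc]
    | succ k =>
      rw [combs] at hc
      rcases List.mem_append.mp hc with h | h
      · obtain ⟨c', hc', rfl⟩ := List.mem_map.mp h
        simp [ih k c' hc']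
      · exact ih (k + 1) c h

-- ---------- one subset: A's emission loop equals B's replicate ----------
theorem pvPerSubset (T : List (List Int)) (v : List Nat) (h3 : 3 ≤ v.length)
    (hsl : v.Sublist (List.range T.length)) (k : Int)
    (cycles : List (Int × List Int)) :
    (List.range' 1 (v.length - 1)).foldl (fun cycles last =>
      if (T.getD (v.getD last 0) []).getD (v.getD 0 0) 0 ≠ 0 then
        (List.range (tread (dpRun T v) (2 ^ v.length - 1) last).toNat).foldl
          (fun cy _ => cy ++ [(k, v.map Int.ofNat)]) cycles
      else cycles) cycles
    = cycles ++ List.replicate ((v.drop 1).foldl (fun c last =>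
        if (T.getD last []).getD (v.headD 0) 0 ≠ 0 then
          c + altPaths T T.length (v.headD 0) (v.foldl (fun m x => m ||| (1 <<< x)) 0) last
        else c) 0).toNat (k, v.map Int.ofNat) := by
  have h1 : 1 ≤ v.length := by omega
  have hmemv : ∀ x ∈ v, x < T.length := fun x hx => List.mem_range.mp (hsl.subset hx)
  have hbv : ∀ i, i < v.length → v.getD i 0 < T.length := by
    intro i hi
    rw [List.getD_eq_getElem _ _ hi]
    exact hmemv _ (List.getElem_mem hi)
  have hpw : v.Pairwise (· < ·) := (List.pairwise_lt_range).sublist hsl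
  have hget := List.pairwise_iff_getElem.mp hpw
  have hinj : ∀ i1 i2, i1 < v.length → i2 < v.length →
      v.getD i1 0 = v.getD i2 0 → i1 = i2 := by
    intro i1 i2 hi1 hi2 he
    rw [List.getD_eq_getElem _ _ hi1, List.getD_eq_getElem _ _ hi2] at he
    rcases Nat.lt_trichotomy i1 i2 with h | h | h
    · have := hget i1 i2 hi1 hi2 h; omega
    · exact h
    · have := hget i2 i1 hi2 hi1 h; omega
  have hmr : ∀ j ∈ List.range' 1 (v.length - 1), 1 ≤ j ∧ j < v.length := by
    intro j hj
    rw [List.mem_range'_1] at hj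
    omega
  rw [pvEmit (k, v.map Int.ofNat) (fun j => tread (dpRun T v) (2 ^ v.length - 1) j)
      (fun j => (T.getD (v.getD j 0) []).getD (v.getD 0 0) 0 ≠ 0)
      (List.range' 1 (v.length - 1))
      (by
        intro j hj
        obtain ⟨hj1, hjk⟩ := hmr j hj
        show 0 ≤ tread (dpRun T v) (2 ^ v.length - 1) j
        rw [pvDpFinal T v h1 j hj1 hjk]
        exact pvFNonneg T v _ j) cycles]
  refine congrArg (fun z : Int => cycles ++ List.replicate z.toNat (k, v.map Int.ofNat)) ?_
  rw [← pvDropMap v, List.foldl_map,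
    pvFoldlIfAdd (fun j => (T.getD (v.getD j 0) []).getD (v.headD 0) 0 ≠ 0)
      (fun j => altPaths T T.length (v.headD 0)
        (v.foldl (fun m x => m ||| (1 <<< x)) 0) (v.getD j 0)),
    zero_add]
  refine congrArg List.sum (List.map_congr_left ?_)
  intro j hj
  obtain ⟨hj1, hjk⟩ := hmr j hj
  rw [pvHeadD]
  have hfull : (2 : Nat) ^ v.length - 1 < 2 ^ v.length := by
    have : 1 ≤ 2 ^ v.length := Nat.one_le_two_pow
    omega
  have hbitfull : (2 ^ v.length - 1 : Nat).testBit j = true := by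
    simp [Nat.testBit_two_pow_sub_one]
    omega
  rw [pvDpFinal T v h1 j hj1 hjk,
    pvFEqAlt T v T.length hbv hinj (2 ^ v.length - 1) hfull j hjk hbitfull,
    pvLiftFull]

-- ---------- the verdict ----------
theorem pvMain (T : List (List Int)) :
    find_all_odd_cycles_with_vsets T = find_all_odd_cycles_with_vsets_alt T := by
  unfold find_all_odd_cycles_with_vsets find_all_odd_cycles_with_vsets_alt
  apply PySem.List.foldl_congr_mem
  intro cycles k hk
  apply PySem.List.foldl_congr_mem
  intro cyc v hv
  have hlen := pvCombsLength _ _ _ hv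
  have hsl := pvCombsSublist _ _ _ hv
  have h3 : 3 ≤ v.length := by
    rw [hlen]
    obtain ⟨i, -, rfl⟩ := List.mem_range'.mp hk
    omega
  exact pvPerSubset T v h3 hsl (k : Int) cyc

-- ===== VERDICT (by name: the statement is the Claim_ definition above) =====
theorem find_all_odd_cycles_with_vsets_spec : Claim_equal_find_all_odd_cycles_with_vsets := by
  intro T _ _
  unfold Spec_find_all_odd_cycles_with_vsets
  exact pvMain T
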